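-- pv_equiv track=rewrite | github.com/beatriizlops/Redes_Hidraulicas | redes_hidraulicas.py | vetor_x
-- ===== SOURCE A (Python) =====
-- def vetor_x(estado):
--     inicios, duracoes = [], []
--     ligada = False
--     for t in range(len(estado)):
--         if estado[t] == 1:
--             if not ligada:
--                 ligada = True
--                 inicios.append(t)
--                 duracoes.append(1)
--             else:
--                 duracoes[-1] += 1
--         else:
--             ligada = False
--     return inicios, duracoes
-- ===== SOURCE B (Python) =====
-- def vetor_x(estado):
--     # run-length scan with two pointers: jump over whole runs of equal values
--     inicios, duracoes = [], []
--     t, n = 0, len(estado)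
--     while t < n:
--         v = estado[t]
--         j = t + 1
--         while j < n and estado[j] == v:
--             j += 1
--         if v == 1:
--             inicios.append(t)
--             duracoes.append(j - t)
--         t = j
--     return inicios, duracoes
-- ===== Notes on version B (the rewrite author's own statement) =====
-- stated objective: alternative
-- what changed: Replaced A's per-element loop with a 'ligada' flag and in-place increments of the last duration by a two-pointer run-length scan that jumps over each maximal run of equal values at once and appends (start, length) for runs of ones.
import Mathlib
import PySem

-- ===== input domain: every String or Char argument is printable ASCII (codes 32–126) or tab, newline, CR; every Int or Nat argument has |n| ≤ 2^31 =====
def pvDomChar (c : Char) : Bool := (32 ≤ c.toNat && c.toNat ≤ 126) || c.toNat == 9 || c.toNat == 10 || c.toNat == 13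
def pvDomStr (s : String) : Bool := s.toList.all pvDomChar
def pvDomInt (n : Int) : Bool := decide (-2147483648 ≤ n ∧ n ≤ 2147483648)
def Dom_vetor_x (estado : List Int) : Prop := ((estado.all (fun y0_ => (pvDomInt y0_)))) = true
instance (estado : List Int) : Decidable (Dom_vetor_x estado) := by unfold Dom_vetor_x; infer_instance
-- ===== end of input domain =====

-- B replaces A's per-element 'ligada'-flag loop by a run-length scan over maximal runs of equal values; alternative, same cost.

-- ===== PORT A =====
-- duracoes[-1] += 1 : increment the last element (A only reaches it with duracoes nonempty)
def pvIncLast : List Int → List Int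
  | [] => []
  | [d] => [d + 1]
  | d :: ds => d :: pvIncLast ds

-- A's for-loop over range(len(estado)), carrying the index t and state (inicios, duracoes, ligada)
def vetorXLoopA : List Int → Int → List Int → List Int → Bool → List Int × List Int
  | [], _, ini, dur, _ => (ini, dur)
  | x :: xs, t, ini, dur, ligada =>
    if x = 1 then
      if !ligada then vetorXLoopA xs (t + 1) (ini ++ [t]) (dur ++ [1]) true
      else vetorXLoopA xs (t + 1) ini (pvIncLast dur) true
    else vetorXLoopA xs (t + 1) ini dur false

def vetor_x (estado : List Int) : List Int × List Int :=
  vetorXLoopA estado 0 [] [] false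

-- ===== PORT B =====
-- B's outer while: take the maximal run of values equal to the head; record (t, run length) if the value is 1.
def vetorXLoopB : List Int → Int → List Int × List Int
  | [], _ => ([], [])
  | x :: xs, t =>
    let len : Int := 1 + (xs.takeWhile (· == x)).length
    let rest := vetorXLoopB (xs.dropWhile (· == x)) (t + len)
    if x = 1 then (t :: rest.1, len :: rest.2) else rest
termination_by l _ => l.length
decreasing_by
  simp only [List.length_cons]
  exact Nat.lt_succ_of_le (List.length_dropWhile_le _ _)

def vetor_x_alt (estado : List Int) : List Int × List Int :=
  vetorXLoopB estado 0

-- ===== PRECONDITION & SPEC =====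
def Spec_vetor_x (estado : List Int) (out : List Int × List Int) : Prop := out = vetor_x_alt estado
instance (estado : List Int) (out : List Int × List Int) : Decidable (Spec_vetor_x estado out) := by unfold Spec_vetor_x; infer_instance

-- ===== CLAIM (what is proved, stated in full; the proofs are below) =====
def Claim_equal_vetor_x : Prop := ∀ (estado : List Int), Dom_vetor_x estado → Spec_vetor_x estado (vetor_x estado)

-- ===== LEMMAS AND PROOFS =====

theorem pvIncLast_append (l : List Int) (d : Int) : pvIncLast (l ++ [d]) = l ++ [d + 1] := by
  induction l with
  | nil => simp [pvIncLast]
  | cons a as ih =>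
    cases as with
    | nil => simp [pvIncLast]
    | cons b bs => simpa [pvIncLast] using ih

-- with ligada = true, A consumes the leading run of 1s, adding its length to the last duration
theorem loopA_true (estado : List Int) : ∀ (t d : Int) (ini dur : List Int),
    vetorXLoopA estado t ini (dur ++ [d]) true =
      vetorXLoopA (estado.dropWhile (· == 1)) (t + (estado.takeWhile (· == 1)).length)
        ini (dur ++ [d + (estado.takeWhile (· == 1)).length]) false := by
  induction estado with
  | nil => intro t d ini dur; simp [vetorXLoopA, List.takeWhile, List.dropWhile]
  | cons x xs ih =>
    intro t d ini dur
    by_cases hx : x = 1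
    · subst hx
      simp only [vetorXLoopA, Bool.not_true, if_neg (by simp : ¬ (false = true))]
      rw [pvIncLast_append, ih (t + 1) (d + 1) ini dur]
      simp only [List.takeWhile, List.dropWhile]
      norm_num
      ring_nf
    · have hb : (x == (1 : Int)) = false := by simp [hx]
      simp only [vetorXLoopA, if_neg hx, List.takeWhile, List.dropWhile, hb]
      norm_num

-- skipping a non-1 element one step at a time equals B's whole-run jump
theorem loopB_skip (x : Int) (xs : List Int) (t : Int) (hx : x ≠ 1) :
    vetorXLoopB (x :: xs) t = vetorXLoopB xs (t + 1) := by
  cases xs with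
  | nil => simp [vetorXLoopB, if_neg hx]
  | cons y ys =>
    by_cases hxy : y = x
    · subst hxy
      rw [vetorXLoopB, vetorXLoopB]
      simp only [if_neg hx, List.takeWhile, List.dropWhile, beq_self_eq_true]
      norm_num
      ring_nf
    · have hb : (y == x) = false := by simp [hxy]
      rw [vetorXLoopB]
      simp only [List.takeWhile, List.dropWhile, hb, if_neg hx]
      norm_num

-- main invariant: A's loop in the ligada = false state appends exactly B's result
theorem loopA_false (estado : List Int) (t : Int) (ini dur : List Int) :
    vetorXLoopA estado t ini dur false =
      (ini ++ (vetorXLoopB estado t).1, dur ++ (vetorXLoopB estado t).2) := by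
  match estado with
  | [] => simp [vetorXLoopA, vetorXLoopB]
  | x :: xs =>
    by_cases hx : x = 1
    · subst hx
      have hlt : (xs.dropWhile (· == (1:Int))).length < (1 :: xs).length :=
        Nat.lt_succ_of_le (List.length_dropWhile_le _ _)
      have hrec := loopA_false (xs.dropWhile (· == 1))
        (t + 1 + ((xs.takeWhile (· == 1)).length : Int)) (ini ++ [t])
        (dur ++ [1 + ((xs.takeWhile (· == 1)).length : Int)])
      rw [vetorXLoopA]
      simp only [Bool.not_false]
      rw [loopA_true, hrec, vetorXLoopB]
      norm_num [List.append_assoc, add_assoc]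
    · have hlt : xs.length < (x :: xs).length := Nat.lt_succ_self _
      have hrec := loopA_false xs (t + 1) ini dur
      rw [vetorXLoopA]
      simp only [if_neg hx]
      rw [hrec, loopB_skip x xs t hx]
  termination_by estado.length
  decreasing_by
  · simpa using List.length_dropWhile_le (· == (1:Int)) xs
  · simp

theorem vetor_x_spec : Claim_equal_vetor_x := by
  intro estado _
  unfold Spec_vetor_x vetor_x vetor_x_alt
  simpa using loopA_false estado 0 [] []
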